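-- pv_equiv track=rewrite | github.com/zandervonn/AnalyticsAutomation | Src/helpers/cleanCsvHelpers.py | extract_split_columns_info
-- ===== SOURCE A (Python) =====
-- def extract_split_columns_info(defined_headers):
-- 	split_columns_info = {}
-- 	for header in defined_headers:
-- 		if '.' in header:
-- 			main_column, subfield = header.split('.', 1)
-- 			if main_column not in split_columns_info:
-- 				split_columns_info[main_column] = []
-- 			split_columns_info[main_column].append(subfield)
-- 	return split_columns_info
-- ===== SOURCE B (Python) =====
-- def extract_split_columns_info(defined_headers):
-- 	pairs = [tuple(h.split('.', 1)) for h in defined_headers if '.' in h]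
-- 	mains = list(dict.fromkeys(m for m, _ in pairs))
-- 	return {m: [s for p, s in pairs if p == m] for m in mains}
-- ===== Notes on version B (the rewrite author's own statement) =====
-- stated objective: alternative
-- what changed: Replaces the single-pass incremental dict grouping with a three-stage pipeline: extract all (main, subfield) pairs, deduplicate main columns in first-occurrence order, then build each group by a per-key filter over the pair list.
import Mathlib
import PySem

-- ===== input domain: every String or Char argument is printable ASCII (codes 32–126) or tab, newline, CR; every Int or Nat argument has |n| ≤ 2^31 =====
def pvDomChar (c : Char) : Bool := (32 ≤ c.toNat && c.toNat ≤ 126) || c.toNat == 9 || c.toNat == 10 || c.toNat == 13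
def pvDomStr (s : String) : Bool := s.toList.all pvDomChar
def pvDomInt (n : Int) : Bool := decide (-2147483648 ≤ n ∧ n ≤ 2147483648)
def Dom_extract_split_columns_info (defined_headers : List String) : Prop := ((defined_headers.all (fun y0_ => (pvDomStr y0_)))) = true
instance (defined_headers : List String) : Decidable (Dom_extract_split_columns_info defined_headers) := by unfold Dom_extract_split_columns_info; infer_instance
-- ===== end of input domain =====

-- B replaces A's one-pass incremental dict grouping by a pipeline (collect pairs, dedup mains, per-main filter); objective: alternative (same results, not faster).

-- ===== PORT A =====
-- 'main, sub = header.split('.', 1)' always binds two pieces when '.' is in header;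
-- the '| _ => d' match arm is the (unreachable on that branch) non-2-tuple case.
def extract_split_columns_info (defined_headers : List String) : List (String × List String) :=
  (defined_headers.foldl (fun d h =>
      if PySem.Str.isIn "." h then
        match PySem.Str.splitMax? h "." 1 with
        | some (m :: s :: _) =>
            (if d.contains m then d else d.insert m []).modify m [] (fun l => l ++ [s])
        | _ => d
      else d)
    PySem.Dict.empty).items

-- ===== PORT B =====
-- B's pair extraction: the tuple unpack of split('.', 1); none is the (unreachable) non-2-tuple case.
def pvPairOf (h : String) : Option (String × String) :=
  (PySem.Str.splitMax? h "." 1).bind fun ps =>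
    ps.head?.bind fun m => ps.tail.head?.map fun s => (m, s)

def extract_split_columns_info_alt (defined_headers : List String) : List (String × List String) :=
  let pairs := (defined_headers.filter (fun h => PySem.Str.isIn "." h)).filterMap pvPairOf
  let mains := PySem.List.dedup (pairs.map (fun p => p.1))
  mains.map (fun m => (m, (pairs.filter (fun p => p.1 == m)).map (fun p => p.2)))

-- ===== PRECONDITION & SPEC =====
def Spec_extract_split_columns_info (defined_headers : List String) (out : List (String × List String)) : Prop := out = extract_split_columns_info_alt defined_headers
instance (defined_headers : List String) (out : List (String × List String)) : Decidable (Spec_extract_split_columns_info defined_headers out) := by unfold Spec_extract_split_columns_info; infer_instance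

-- ===== CLAIM (what is proved, stated in full; the proofs are below) =====
def Claim_equal_extract_split_columns_info : Prop := ∀ (defined_headers : List String), Dom_extract_split_columns_info defined_headers → Spec_extract_split_columns_info defined_headers (extract_split_columns_info defined_headers)

-- ===== LEMMAS AND PROOFS =====

-- A's 'ensure key, then append' step is a plain modify.
theorem pv_setdefault_modify {κ : Type} {β : Type} [BEq κ] [LawfulBEq κ]
    (d : PySem.Dict κ (List β)) (m : κ) (f : List β → List β) :
    (if d.contains m then d else d.insert m ([] : List β)).modify m [] f = d.modify m [] f := by
  by_cases hc : d.contains m = true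
  · simp [hc]
  · simp only [Bool.not_eq_true] at hc
    simp [hc, PySem.Dict.modify, PySem.Dict.getD_of_not_contains d ([] : List β) hc,
      PySem.Dict.insert_insert_self,
      PySem.Dict.getD_of_get?_eq_some _ _ (PySem.Dict.get?_insert_self d m ([] : List β))]

-- a fold whose body matches on an Option-producing extraction is a fold over the filterMap
theorem pv_foldl_match {α β δ : Type} (f : α → Option β) (g : δ → β → δ)
    (l : List α) (init : δ) :
    l.foldl (fun d x => match f x with | some y => g d y | none => d) init
      = (l.filterMap f).foldl g init := by
  induction l generalizing init with
  | nil => rfl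
  | cons x xs ih =>
    cases hfx : f x <;> simp [hfx, ih]

theorem pv_stepA_eq (d : PySem.Dict String (List String)) (h : String) :
    (match PySem.Str.splitMax? h "." 1 with
      | some (m :: s :: _) =>
          (if d.contains m then d else d.insert m []).modify m [] (fun l => l ++ [s])
      | _ => d)
      = (match pvPairOf h with
          | some y => d.modify y.1 [] (fun l => l ++ [y.2])
          | none => d) := by
  unfold pvPairOf
  rcases hs : PySem.Str.splitMax? h "." 1 with _ | ⟨_ | ⟨m, _ | ⟨s, t⟩⟩⟩ <;>
    simp only [Option.bind_none, Option.bind_some, List.head?_nil, List.head?_cons,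
      List.tail_nil, List.tail_cons, Option.map_some, Option.map_none] <;>
    first
      | rfl
      | exact pv_setdefault_modify d m (fun l => l ++ [s])

-- ===== VERDICT (by name: the statement is the Claim_ definition above) =====
theorem extract_split_columns_info_spec : Claim_equal_extract_split_columns_info := by
  intro headers _
  unfold Spec_extract_split_columns_info extract_split_columns_info extract_split_columns_info_alt
  have hbody :
      (headers.foldl (fun d h =>
          if PySem.Str.isIn "." h then
            match PySem.Str.splitMax? h "." 1 with
            | some (m :: s :: _) =>
                (if d.contains m then d else d.insert m []).modify m [] (fun l => l ++ [s])
            | _ => d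
          else d) PySem.Dict.empty)
        = (((headers.filter (fun h => PySem.Str.isIn "." h)).filterMap pvPairOf).foldl
            (fun d p => d.modify p.1 [] (fun l => l ++ [p.2])) PySem.Dict.empty) := by
    rw [PySem.List.foldl_if_eq_foldl_filter (fun h => PySem.Str.isIn "." h)
        (fun d h =>
          match PySem.Str.splitMax? h "." 1 with
          | some (m :: s :: _) =>
              (if d.contains m then d else d.insert m []).modify m [] (fun l => l ++ [s])
          | _ => d) headers PySem.Dict.empty,
      ← pv_foldl_match (f := pvPairOf)
        (g := fun (d : PySem.Dict String (List String)) (p : String × String) =>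
          d.modify p.1 [] (fun l => l ++ [p.2]))]
    refine PySem.List.foldl_congr_mem _ _ _ _ (fun d h _ => ?_)
    have hst := pv_stepA_eq d h
    cases hy : pvPairOf h <;> rw [hy] at hst <;> simpa using hst
  rw [hbody]
  set pairs := (headers.filter (fun h => PySem.Str.isIn "." h)).filterMap pvPairOf with hp
  have hnd : ((pairs.foldl (fun d p => d.modify p.1 [] (fun l => l ++ [p.2]))
      PySem.Dict.empty)).keys.Nodup :=
    PySem.Dict.nodup_keys_foldl_modify_key pairs (fun p => p.1) []
      (fun _ p => fun l => l ++ [p.2]) PySem.Dict.empty (by simp [PySem.Dict.keys_empty])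
  rw [PySem.Dict.items_eq_map_keys _ hnd ([] : List String),
    PySem.Dict.keys_foldl_modify_key pairs (fun p => p.1) []
      (fun _ p => fun l => l ++ [p.2]) PySem.Dict.empty]
  simp only [PySem.List.dedup_eq_ofList]
  have hkeys : PySem.Set.update (PySem.Dict.empty : PySem.Dict String (List String)).keys
      (pairs.map (fun p => p.1)) = PySem.Set.ofList (pairs.map (fun p => p.1)) := by
    simp [PySem.Dict.keys_empty, PySem.Set.update_nil_left]
  rw [hkeys]
  refine List.map_congr_left (fun m _ => ?_)
  rw [PySem.Dict.getD_foldl_modify_append pairs PySem.Dict.empty m]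
  simp [PySem.Dict.getD_empty]
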